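-- pv_equiv track=rewrite | github.com/stjer/giboconverter | 기보캡쳐기 ocr ver.py | chkdup
-- ===== SOURCE A (Python) =====
-- def chkdup(input_list):#중복되는 이름이 입력된 경우 번호를 달아줌
--     # 입력된 값들을 딕셔너리로 변환하여 각 값의 출현 횟수를 세기
--     counts = {}
--     for item in input_list:
--         counts[item] = counts.get(item, 0) + 1
--
--     # 중복된 값에 대해 이름 변경
--     renamed_list = []
--     for item in input_list:
--         if counts[item] > 1:
--             renamed_list.append(f"{item}_({counts[item]})")
--             counts[item] -= 1
--         else:
--             renamed_list.append(item)
--     return renamed_list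
-- ===== SOURCE B (Python) =====
-- def chkdup(input_list):
--     # Single reverse pass: count occurrences from the end on the fly, no separate counting pass.
--     seen = {}
--     out = []
--     for item in reversed(input_list):
--         c = seen.get(item, 0) + 1
--         seen[item] = c
--         out.append(item if c == 1 else f"{item}_({c})")
--     out.reverse()
--     return out
-- ===== Notes on version B (the rewrite author's own statement) =====
-- stated objective: simpler
-- what changed: Replaces A's two passes (a counting pass plus an emitting pass that mutates the counts dict) by a single reverse traversal maintaining running per-item counts from the end, building the output backwards and reversing it once.
import Mathlib
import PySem

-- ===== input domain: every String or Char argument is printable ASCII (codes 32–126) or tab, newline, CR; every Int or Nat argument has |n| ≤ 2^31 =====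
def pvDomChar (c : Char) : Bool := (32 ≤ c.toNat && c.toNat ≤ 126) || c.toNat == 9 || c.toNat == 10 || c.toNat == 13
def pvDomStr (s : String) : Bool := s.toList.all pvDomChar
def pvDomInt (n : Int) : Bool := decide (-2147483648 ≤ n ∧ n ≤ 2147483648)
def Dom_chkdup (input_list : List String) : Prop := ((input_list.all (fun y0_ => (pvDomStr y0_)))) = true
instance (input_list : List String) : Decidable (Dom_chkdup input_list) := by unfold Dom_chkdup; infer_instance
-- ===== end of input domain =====

-- B differs from A only in structure: one reverse pass with running counts instead of
-- a counting pass followed by an emitting pass. Equivalence is exact (no Pre_ needed).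

-- ===== PORT A =====
-- f"{item}_({c})"
def pvTag (item : String) (c : Int) : String := item ++ "_(" ++ PySem.Int.toStr c ++ ")"

def chkdup (input_list : List String) : List String :=
  -- counts = {}; for item in input_list: counts[item] = counts.get(item, 0) + 1
  let counts : PySem.Dict String Int :=
    input_list.foldl (fun d item => d.insert item (d.getD item 0 + 1)) PySem.Dict.empty
  -- renamed_list = []; for item in input_list: …
  (input_list.foldl
    (fun (st : PySem.Dict String Int × List String) item =>
      let c := st.1.getD item 0
      if c > 1 then (st.1.insert item (c - 1), st.2 ++ [pvTag item c])
      else (st.1, st.2 ++ [item]))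
    (counts, [])).2

-- ===== PORT B =====
def chkdup_alt (input_list : List String) : List String :=
  -- seen = {}; out = []; for item in reversed(input_list): …; out.reverse(); return out
  (input_list.reverse.foldl
    (fun (st : PySem.Dict String Int × List String) item =>
      let c := st.1.getD item 0 + 1
      (st.1.insert item c, st.2 ++ [if c == 1 then item else pvTag item c]))
    (PySem.Dict.empty, [])).2.reverse

-- ===== PRECONDITION & SPEC =====
def Spec_chkdup (input_list : List String) (out : List String) : Prop := out = chkdup_alt input_list
instance (input_list : List String) (out : List String) : Decidable (Spec_chkdup input_list out) := by unfold Spec_chkdup; infer_instance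

-- ===== CLAIM (what is proved, stated in full; the proofs are below) =====
def Claim_equal_chkdup : Prop := ∀ (input_list : List String), Dom_chkdup input_list → Spec_chkdup input_list (chkdup input_list)

-- ===== LEMMAS AND PROOFS =====

-- Canonical description: each element gets the count of its occurrences from its own
-- position to the end of the list; a suffixed name iff that count exceeds 1.
def pvCanon : List String → List String
  | [] => []
  | x :: xs =>
    (if ((xs.count x : Int) + 1) > 1 then pvTag x ((xs.count x : Int) + 1) else x) :: pvCanon xs

-- pvCanon relative to an ambient multiset p of elements conceptually following the list.
def pvCanonP : List String → List String → List String
  | [], _ => []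
  | x :: xs, p =>
    (if (((xs ++ p).count x : Int) + 1) > 1 then pvTag x (((xs ++ p).count x : Int) + 1) else x)
      :: pvCanonP xs p

-- B's reverse pass, abstracted: the dict state replaced by the list p of already-seen items.
def pvBrun : List String → List String → List String
  | [], _ => []
  | x :: xs, p =>
    (if ((p.count x : Int) + 1) == 1 then x else pvTag x ((p.count x : Int) + 1))
      :: pvBrun xs (x :: p)

theorem pvA_loop (rest : List String) (d : PySem.Dict String Int) (acc : List String)
    (h : ∀ y ∈ rest, d.getD y 0 = (rest.count y : Int)) :
    (rest.foldl
      (fun (st : PySem.Dict String Int × List String) item =>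
        let c := st.1.getD item 0
        if c > 1 then (st.1.insert item (c - 1), st.2 ++ [pvTag item c])
        else (st.1, st.2 ++ [item]))
      (d, acc)).2 = acc ++ pvCanon rest := by
  induction rest generalizing d acc with
  | nil => simp [pvCanon]
  | cons x xs ih =>
    have hx : d.getD x 0 = (xs.count x : Int) + 1 := by
      have := h x (by simp)
      simpa [List.count_cons] using this
    by_cases hgt : ((xs.count x : Int) + 1) > 1
    · have hcount : (0 : Int) < (xs.count x : Int) := by omega
      have hcanon : pvCanon (x :: xs) = pvTag x ((xs.count x : Int) + 1) :: pvCanon xs := by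
        simp only [pvCanon]; rw [if_pos hgt]
      simp only [List.foldl_cons, hx, if_pos hgt]
      rw [ih _ _ ?_]
      · rw [hcanon]; simp
      · intro y hy
        rcases eq_or_ne y x with rfl | hne
        · rw [PySem.Dict.getD_insert_self]; omega
        · have hne' : x ≠ y := Ne.symm hne
          rw [PySem.Dict.getD_insert_of_ne _ _ _ hne]
          have := h y (by simp [hy])
          simpa [List.count_cons, hne'] using this
    · have hzero : xs.count x = 0 := by omega
      have hnx : x ∉ xs := by simpa using List.count_eq_zero.mp hzero
      have hcanon : pvCanon (x :: xs) = x :: pvCanon xs := by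
        simp only [pvCanon]; rw [if_neg hgt]
      simp only [List.foldl_cons, hx, if_neg hgt]
      rw [ih _ _ ?_]
      · rw [hcanon]; simp
      · intro y hy
        have hne' : x ≠ y := fun e => hnx (e ▸ hy)
        have := h y (by simp [hy])
        simpa [List.count_cons, hne'] using this

theorem pvB_loop (r : List String) (d : PySem.Dict String Int) (acc p : List String)
    (h : ∀ y, d.getD y 0 = (p.count y : Int)) :
    (r.foldl
      (fun (st : PySem.Dict String Int × List String) item =>
        let c := st.1.getD item 0 + 1
        (st.1.insert item c, st.2 ++ [if c == 1 then item else pvTag item c]))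
      (d, acc)).2 = acc ++ pvBrun r p := by
  induction r generalizing d acc p with
  | nil => simp [pvBrun]
  | cons x xs ih =>
    simp only [List.foldl_cons, h x]
    rw [ih _ _ (x :: p) ?_]
    · simp [pvBrun]
    · intro y
      rcases eq_or_ne y x with rfl | hne
      · rw [PySem.Dict.getD_insert_self]; simp
      · rw [PySem.Dict.getD_insert_of_ne _ _ _ hne]
        simp [h y, Ne.symm hne]

theorem pvCanonP_snoc (ys : List String) (x : String) (p : List String) :
    pvCanonP (ys ++ [x]) p =
      pvCanonP ys (x :: p) ++
        [if ((p.count x : Int) + 1) > 1 then pvTag x ((p.count x : Int) + 1) else x] := by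
  induction ys generalizing p with
  | nil => simp [pvCanonP]
  | cons y ys ih =>
    have hc : ((ys ++ [x]) ++ p).count y = (ys ++ x :: p).count y := by
      simp [List.count_append, List.count_cons]
    simp only [List.cons_append, pvCanonP, hc, ih]

theorem pvBrun_reverse (r p : List String) :
    (pvBrun r p).reverse = pvCanonP r.reverse p := by
  induction r generalizing p with
  | nil => simp [pvBrun, pvCanonP]
  | cons x xs ih =>
    simp only [pvBrun, List.reverse_cons, ih, pvCanonP_snoc]
    congr 1
    have h1 : (0 : Int) ≤ (p.count x : Int) := by positivity
    by_cases he : ((p.count x : Int) + 1) = 1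
    · simp [he]
    · have : ((p.count x : Int) + 1) > 1 := by omega
      simp only [beq_iff_eq, if_neg he, if_pos this]

theorem pvCanonP_nil (l : List String) : pvCanonP l [] = pvCanon l := by
  induction l with
  | nil => rfl
  | cons x xs ih => simp [pvCanonP, pvCanon, ih]

theorem chkdup_eq_canon (l : List String) : chkdup l = pvCanon l := by
  unfold chkdup
  rw [pvA_loop l _ [] ?_]
  · simp
  · intro y _
    rw [PySem.Dict.foldl_insert_getD_add_one_eq_counter, PySem.Dict.getD_counter]

theorem chkdup_alt_eq_canon (l : List String) : chkdup_alt l = pvCanon l := by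
  unfold chkdup_alt
  rw [pvB_loop l.reverse _ [] [] (fun y => by simp [PySem.Dict.getD_empty])]
  simp [pvBrun_reverse, pvCanonP_nil]

-- ===== VERDICT (by name: the statement is the Claim_ definition above) =====
theorem chkdup_spec : Claim_equal_chkdup := by
  intro l _
  unfold Spec_chkdup
  rw [chkdup_eq_canon, chkdup_alt_eq_canon]
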